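-- pv_equiv track=rewrite | github.com/va30400/pythonProject | CC_1.py | multo
-- ===== SOURCE A (Python) =====
-- def multo(num1, num2):
--     if num1 == num2:
--         return True
--     elif num2 % 2 == 0 and num2 // 2 > 1:
--         num2 = num2 // 2
--         """print (num2,type(num2))"""
--         return multo(num1, num2)
--     else:
--         return False
-- ===== SOURCE B (Python) =====
-- def multo(num1, num2):
--     if num1 == num2:
--         return True
--     if num1 < 2 or num2 % num1 != 0:
--         return False
--     q = num2 // num1
--     if q < 2:
--         return False
--     while q > 1 and q % 2 == 0:
--         q //= 2
--     return q == 1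
-- ===== Notes on version B (the rewrite author's own statement) =====
-- stated objective: alternative
-- what changed: Instead of recursively halving num2 until it hits num1, B divides num2 by num1 once (after checking num1 >= 2 and exact divisibility) and checks that the quotient is a power of two >= 2 by stripping factors of 2.
import Mathlib
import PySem

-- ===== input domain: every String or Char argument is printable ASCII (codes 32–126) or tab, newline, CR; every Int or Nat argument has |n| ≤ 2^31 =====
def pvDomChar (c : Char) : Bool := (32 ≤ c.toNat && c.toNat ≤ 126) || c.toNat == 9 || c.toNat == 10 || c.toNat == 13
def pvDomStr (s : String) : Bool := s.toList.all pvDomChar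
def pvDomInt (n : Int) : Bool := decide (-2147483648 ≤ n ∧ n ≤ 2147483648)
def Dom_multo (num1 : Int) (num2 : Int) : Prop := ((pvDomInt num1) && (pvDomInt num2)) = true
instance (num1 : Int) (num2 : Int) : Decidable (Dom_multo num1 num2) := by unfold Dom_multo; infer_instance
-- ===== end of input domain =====

-- B replaces A's step-by-step recursive halving by one exact division num2 // num1
-- followed by stripping factors of two from the quotient (objective: alternative decomposition).

-- ===== PORT A =====
def multo (num1 : Int) (num2 : Int) : Bool :=
  if num1 == num2 then true
  else if PySem.Int.mod num2 2 == 0 && 1 < PySem.Int.floordiv num2 2 then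
    multo num1 (PySem.Int.floordiv num2 2)
  else false
termination_by num2.natAbs
decreasing_by
  rename_i h
  simp only [Bool.and_eq_true, decide_eq_true_eq, beq_iff_eq] at h
  rw [PySem.Int.floordiv_eq_ediv_of_pos (by omega : (0:Int) < 2)] at h ⊢
  rw [PySem.Int.mod_eq_emod_of_pos (by omega : (0:Int) < 2)] at h
  omega

-- ===== PORT B =====
-- while q > 1 and q % 2 == 0: q //= 2
def pvStrip (q : Int) : Int :=
  if 1 < q && PySem.Int.mod q 2 == 0 then pvStrip (PySem.Int.floordiv q 2) else q
termination_by q.natAbs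
decreasing_by
  rename_i h
  simp only [Bool.and_eq_true, decide_eq_true_eq, beq_iff_eq] at h
  rw [PySem.Int.floordiv_eq_ediv_of_pos (by omega : (0:Int) < 2)]
  rw [PySem.Int.mod_eq_emod_of_pos (by omega : (0:Int) < 2)] at h
  omega

def multo_alt (num1 : Int) (num2 : Int) : Bool :=
  if num1 == num2 then true
  else if num1 < 2 || !(PySem.Int.mod num2 num1 == 0) then false
  else
    let q := PySem.Int.floordiv num2 num1
    if q < 2 then false
    else pvStrip q == 1

-- ===== PRECONDITION & SPEC =====
def Spec_multo (num1 : Int) (num2 : Int) (out : Bool) : Prop := out = multo_alt num1 num2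
instance (num1 : Int) (num2 : Int) (out : Bool) : Decidable (Spec_multo num1 num2 out) := by unfold Spec_multo; infer_instance

-- ===== CLAIM (what is proved, stated in full; the proofs are below) =====
def Claim_equal_multo : Prop := ∀ (num1 : Int) (num2 : Int), Dom_multo num1 num2 → Spec_multo num1 num2 (multo num1 num2)

-- ===== LEMMAS AND PROOFS =====

theorem pvStrip_double (q : Int) (hq : 1 ≤ q) : pvStrip (2 * q) = pvStrip q := by
  rw [pvStrip]
  have h1 : PySem.Int.mod (2 * q) 2 = 0 := by
    rw [PySem.Int.mod_eq_emod_of_pos (by omega : (0:Int) < 2)]; omega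
  have h2 : PySem.Int.floordiv (2 * q) 2 = q := by
    rw [PySem.Int.floordiv_eq_ediv_of_pos (by omega : (0:Int) < 2)]; omega
  rw [if_pos, h2]
  simp [show (1:Int) < 2 * q by omega]

theorem pvStrip_odd (q : Int) (hq : q % 2 = 1) : pvStrip q = q := by
  rw [pvStrip, if_neg]
  simp only [Bool.and_eq_true, decide_eq_true_eq, beq_iff_eq, not_and]
  intro _
  rw [PySem.Int.mod_eq_emod_of_pos (by omega : (0:Int) < 2)]
  omega

theorem pvStrip_one : pvStrip 1 = 1 := by rw [pvStrip]; simp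

theorem pvStrip_two : pvStrip 2 = 1 := by
  have := pvStrip_double 1 (by omega); simpa [pvStrip_one] using this

-- B agrees with one halving step of A
theorem alt_half (n1 n2 : Int) (hne : n1 ≠ n2)
    (hmod : PySem.Int.mod n2 2 = 0) (hdiv : 1 < PySem.Int.floordiv n2 2) :
    multo_alt n1 (PySem.Int.floordiv n2 2) = multo_alt n1 n2 := by
  rw [PySem.Int.mod_eq_emod_of_pos (by omega : (0:Int) < 2)] at hmod
  rw [PySem.Int.floordiv_eq_ediv_of_pos (by omega : (0:Int) < 2)] at hdiv ⊢
  set m := n2 / 2 with hm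
  have hn2 : n2 = 2 * m := by omega
  have hm2 : 2 ≤ m := hdiv
  by_cases hem : n1 = m
  · have h1 : multo_alt n1 m = true := by simp [multo_alt, hem]
    have hd : PySem.Int.mod n2 n1 = 0 := by
      rw [PySem.Int.mod_eq_zero_iff_dvd]; exact ⟨2, by omega⟩
    have hq : PySem.Int.floordiv n2 n1 = 2 := by
      rw [PySem.Int.floordiv_eq_ediv_of_pos (show (0:Int) < n1 by omega),
          show n2 = n1 * 2 by omega, Int.mul_ediv_cancel_left _ (by omega)]
    have h2 : multo_alt n1 n2 = true := by
      simp [multo_alt, hne, hd, hq, pvStrip_two, show ¬ n1 < 2 by omega]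
    rw [h1, h2]
  · simp only [multo_alt, beq_iff_eq, hne, hem, if_false]
    by_cases hlt : n1 < 2
    · simp [hlt]
    · have hn1 : 0 < n1 := by omega
      by_cases hdm : n1 ∣ m
      · obtain ⟨q', hq'⟩ := hdm
        have hq'pos : 1 ≤ q' := by nlinarith
        have hq'ne : q' ≠ 1 := fun h => hem (by simp [hq', h])
        have hq'2 : 2 ≤ q' := by omega
        have hmodm : PySem.Int.mod m n1 = 0 := by
          rw [PySem.Int.mod_eq_zero_iff_dvd]; exact ⟨q', hq'⟩
        have hmodn : PySem.Int.mod n2 n1 = 0 := by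
          rw [PySem.Int.mod_eq_zero_iff_dvd]
          exact ⟨2 * q', by rw [hn2, hq']; ring⟩
        have hfm : m / n1 = q' := by rw [hq', Int.mul_ediv_cancel_left _ (by omega)]
        have hfn : n2 / n1 = 2 * q' := by
          rw [show n2 = n1 * (2 * q') by rw [hn2, hq']; ring,
              Int.mul_ediv_cancel_left _ (by omega)]
        rw [PySem.Int.floordiv_eq_ediv_of_pos hn1, PySem.Int.floordiv_eq_ediv_of_pos hn1,
            hfm, hfn, hmodm, hmodn]
        simp only [beq_self_eq_true, Bool.not_true, Bool.or_false, decide_eq_true_eq]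
        rw [pvStrip_double q' (by omega)]
        simp [hlt, show ¬ q' < 2 by omega, show ¬ 2 * q' < 2 by omega]
      · have hmodm : ¬ PySem.Int.mod m n1 = 0 := by
          rw [PySem.Int.mod_eq_zero_iff_dvd]; exact hdm
        by_cases hdn : n1 ∣ n2
        · obtain ⟨q, hq⟩ := hdn
          have hqodd : q % 2 = 1 := by
            rcases Int.emod_two_eq q with h | h
            · exfalso
              obtain ⟨r, hr⟩ : ∃ r, q = 2 * r := ⟨q / 2, by omega⟩
              refine hdm ⟨r, ?_⟩
              have e : n1 * q = 2 * (n1 * r) := by rw [hr]; ring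
              omega
            · exact h
          have hfn : n2 / n1 = q := by rw [hq, Int.mul_ediv_cancel_left _ (by omega)]
          have hmodn : PySem.Int.mod n2 n1 = 0 := by
            rw [PySem.Int.mod_eq_zero_iff_dvd]; exact ⟨q, hq⟩
          have hqpos : 1 ≤ q := by nlinarith
          rw [PySem.Int.floordiv_eq_ediv_of_pos hn1, PySem.Int.floordiv_eq_ediv_of_pos hn1,
              hfn, hmodn]
          by_cases hq1 : q = 1
          · simp [hmodm, hq1]
          · rw [pvStrip_odd q hqodd]
            simp [hmodm, show q ≠ 1 from hq1]
        · have hmodn : ¬ PySem.Int.mod n2 n1 = 0 := by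
            rw [PySem.Int.mod_eq_zero_iff_dvd]; exact hdn
          simp [hmodm, hmodn]

-- if A's halving guard fails (and n1 ≠ n2), B returns false
theorem alt_false (n1 n2 : Int) (hne : n1 ≠ n2)
    (h : ¬ (PySem.Int.mod n2 2 = 0 ∧ 1 < PySem.Int.floordiv n2 2)) :
    multo_alt n1 n2 = false := by
  rw [PySem.Int.mod_eq_emod_of_pos (by omega : (0:Int) < 2),
      PySem.Int.floordiv_eq_ediv_of_pos (by omega : (0:Int) < 2)] at h
  simp only [multo_alt, beq_iff_eq, hne, if_false]
  by_cases hlt : n1 < 2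
  · simp [hlt]
  · by_cases hd : n1 ∣ n2
    · obtain ⟨q, hq⟩ := hd
      have hn1 : 0 < n1 := by omega
      have hmodn : PySem.Int.mod n2 n1 = 0 := by
        rw [PySem.Int.mod_eq_zero_iff_dvd]; exact ⟨q, hq⟩
      have hfn : PySem.Int.floordiv n2 n1 = q := by
        rw [PySem.Int.floordiv_eq_ediv_of_pos hn1, hq, Int.mul_ediv_cancel_left _ (by omega)]
      rw [hfn, hmodn]
      by_cases hq2 : q < 2
      · simp [hq2]
      · rcases Int.emod_two_eq q with he | ho
        · exfalso
          apply h
          obtain ⟨r, hr⟩ : ∃ r, q = 2 * r := ⟨q / 2, by omega⟩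
          have e : n1 * q = 2 * (n1 * r) := by rw [hr]; ring
          have hr1 : 1 ≤ r := by omega
          have hnr : 2 * 1 ≤ n1 * r :=
            mul_le_mul (by omega) (by omega) (by omega) (by omega)
          constructor
          · omega
          · have : n2 / 2 = n1 * r := by omega
            omega
        · rw [pvStrip_odd q ho]
          simp [show q ≠ 1 by omega]
    · have hmodn : ¬ PySem.Int.mod n2 n1 = 0 := by
        rw [PySem.Int.mod_eq_zero_iff_dvd]; exact hd
      simp [hmodn]

theorem multo_eq (n1 n2 : Int) : multo n1 n2 = multo_alt n1 n2 := by
  by_cases h0 : n1 = n2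
  · rw [multo, multo_alt]; simp [h0]
  · by_cases hg : PySem.Int.mod n2 2 = 0 ∧ 1 < PySem.Int.floordiv n2 2
    · have hrec := multo_eq n1 (PySem.Int.floordiv n2 2)
      rw [multo]
      rw [if_neg (by simp [h0]), if_pos (by
        have h1 := (PySem.Int.mod_eq_zero_iff_dvd n2 2).mp hg.1
        have h2 := hg.2
        rw [PySem.Int.floordiv_eq_ediv_of_pos (by omega : (0:Int) < 2)] at h2
        simp [h1, h2])]
      rw [hrec]
      exact alt_half n1 n2 h0 hg.1 hg.2
    · rw [multo]
      rw [if_neg (by simp [h0]), if_neg (by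
        simp only [Bool.and_eq_true, decide_eq_true_eq, beq_iff_eq]
        exact fun hc => hg ⟨hc.1, hc.2⟩)]
      rw [alt_false n1 n2 h0 hg]
termination_by n2.natAbs
decreasing_by
  rw [PySem.Int.floordiv_eq_ediv_of_pos (by omega : (0:Int) < 2)]
  rcases hg with ⟨h1, h2⟩
  rw [PySem.Int.mod_eq_emod_of_pos (by omega : (0:Int) < 2)] at h1
  rw [PySem.Int.floordiv_eq_ediv_of_pos (by omega : (0:Int) < 2)] at h2
  omega

-- ===== VERDICT (by name: the statement is the Claim_ definition above) =====
theorem multo_spec : Claim_equal_multo := by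
  intro n1 n2 _
  show multo n1 n2 = multo_alt n1 n2
  exact multo_eq n1 n2
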